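-- pv_equiv track=rewrite | github.com/AarryaSaraf/JPEG-CSE102- | myjpeg (1).py | rle0
-- ===== SOURCE A (Python) =====
-- def rle0(g):
--     """ DESCRIPTION
--     --------------
--     use, inputs, and outputs as described. Complexity O(n)
--     where n denote the number of elements in g"""
--     c=0
--     arr=[]
--     for i in g:
--         if(i==0):
--             c=c+1
--         else:
--             arr.append((c,i))
--             c=0
--     return arr
-- ===== SOURCE B (Python) =====
-- def rle0(g):
--     # Two-phase: collect nonzero (index, value) pairs, then derive each
--     # zero-run length as the gap between successive nonzero positions.
--     nz = [(idx, val) for idx, val in enumerate(g) if val != 0]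
--     arr = []
--     prev = -1
--     for idx, val in nz:
--         arr.append((idx - prev - 1, val))
--         prev = idx
--     return arr
-- ===== Notes on version B (the rewrite author's own statement) =====
-- stated objective: alternative
-- what changed: Instead of accumulating and resetting a zero counter in one pass, B first collects the nonzero entries as (index, value) pairs and then computes each run length as the gap between successive nonzero positions.
import Mathlib
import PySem

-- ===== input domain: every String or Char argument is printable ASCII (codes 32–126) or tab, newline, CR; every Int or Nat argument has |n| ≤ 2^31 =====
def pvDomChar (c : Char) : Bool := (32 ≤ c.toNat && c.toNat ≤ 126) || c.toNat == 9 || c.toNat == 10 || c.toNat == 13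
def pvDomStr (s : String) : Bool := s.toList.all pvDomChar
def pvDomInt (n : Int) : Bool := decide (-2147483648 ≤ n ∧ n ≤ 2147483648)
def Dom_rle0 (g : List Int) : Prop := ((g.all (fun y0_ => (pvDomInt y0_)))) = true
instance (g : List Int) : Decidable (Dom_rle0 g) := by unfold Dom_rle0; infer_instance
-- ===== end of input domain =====

-- B re-implements A's counter-reset RLE as a two-phase gap computation over nonzero positions; same values, alternative decomposition.

-- ===== PORT A =====
-- single pass: state (c, arr); zero increments c, nonzero appends (c, i) and resets c
def rle0 (g : List Int) : List (Int × Int) :=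
  (g.foldl (fun (s : Int × List (Int × Int)) i =>
      if i = 0 then (s.1 + 1, s.2) else ((0 : Int), s.2 ++ [(s.1, i)])) ((0 : Int), [])).2

-- ===== PORT B =====
-- phase 1: nonzero entries as (index, value) pairs
def rle0NZ (idx : Int) : List Int → List (Int × Int)
  | [] => []
  | x :: xs => if x ≠ 0 then (idx, x) :: rle0NZ (idx + 1) xs else rle0NZ (idx + 1) xs

-- phase 2: run lengths as gaps between successive nonzero positions
def rle0Gaps (prev : Int) : List (Int × Int) → List (Int × Int)
  | [] => []
  | (idx, v) :: rest => (idx - prev - 1, v) :: rle0Gaps idx rest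

def rle0_alt (g : List Int) : List (Int × Int) := rle0Gaps (-1) (rle0NZ 0 g)

-- ===== PRECONDITION & SPEC =====
def Spec_rle0 (g : List Int) (out : List (Int × Int)) : Prop := out = rle0_alt g
instance (g : List Int) (out : List (Int × Int)) : Decidable (Spec_rle0 g out) := by unfold Spec_rle0; infer_instance

-- ===== CLAIM (what is proved, stated in full; the proofs are below) =====
def Claim_equal_rle0 : Prop := ∀ (g : List Int), Dom_rle0 g → Spec_rle0 g (rle0 g)

-- ===== LEMMAS AND PROOFS =====

theorem rle0_fold_inv (xs : List Int) :
    ∀ (idx c : Int) (acc : List (Int × Int)),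
      (xs.foldl (fun (s : Int × List (Int × Int)) i =>
          if i = 0 then (s.1 + 1, s.2) else ((0 : Int), s.2 ++ [(s.1, i)])) (c, acc)).2
        = acc ++ rle0Gaps (idx - c - 1) (rle0NZ idx xs) := by
  induction xs with
  | nil => intro idx c acc; simp [rle0NZ, rle0Gaps]
  | cons x xs ih =>
    intro idx c acc
    by_cases hx : x = 0
    · subst hx
      simp only [List.foldl_cons, rle0NZ, ne_eq, not_true_eq_false, if_false]
      have := ih (idx + 1) (c + 1) acc
      have harith : idx + 1 - (c + 1) - 1 = idx - c - 1 := by ring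
      rw [harith] at this
      exact this
    · simp only [List.foldl_cons, if_neg hx, rle0NZ, if_pos hx]
      have := ih (idx + 1) 0 (acc ++ [(c, x)])
      rw [this, rle0Gaps]
      have h1 : idx - (idx - c - 1) - 1 = c := by ring
      have h2 : idx + 1 - 0 - 1 = idx := by ring
      rw [h1, h2]
      simp

-- ===== VERDICT (by name: the statement is the Claim_ definition above) =====
theorem rle0_spec : Claim_equal_rle0 := by
  intro g _
  unfold Spec_rle0 rle0 rle0_alt
  have := rle0_fold_inv g 0 0 []
  simpa using this
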